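-- pv_equiv track=rewrite | github.com/dekkerglen/CubeCobra | packages/archetypeAnnotater/src/scripts/labelClusters.py | collect_card_names
-- ===== SOURCE A (Python) =====
-- def collect_card_names(summaries: list[dict]) -> set[str]:
--     """Build a set of all card names from cluster data (lowercased)."""
--     names = set()
--     for cluster in summaries:
--         for card in cluster.get("topCards", []):
--             name = card["name"].lower()
--             names.add(name)
--             for word in name.split():
--                 if len(word) >= 4:
--                     names.add(word)
--     return names
-- ===== SOURCE B (Python) =====
-- def _card_set(card):
--     """The token set contributed by one card: its lowercased name and its long (>=4) words."""
--     name = card["name"].lower()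
--     return {name} | {w for w in name.split() if len(w) >= 4}
--
--
-- def _union_all(sets):
--     """Merge a list of sets with a divide-and-conquer tree of unions."""
--     if not sets:
--         return set()
--     if len(sets) == 1:
--         return sets[0]
--     mid = len(sets) // 2
--     return _union_all(sets[:mid]) | _union_all(sets[mid:])
--
--
-- def collect_card_names(summaries: list[dict]) -> set[str]:
--     """Build a set of all card names from cluster data (lowercased)."""
--     card_sets = [
--         _card_set(card)
--         for cluster in summaries
--         for card in cluster.get("topCards", [])
--     ]
--     return _union_all(card_sets)
-- ===== Notes on version B (the rewrite author's own statement) =====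
-- stated objective: alternative
-- what changed: A threads one mutable set through a fused triple-nested loop with conditional adds; B maps each card to its own small token set and then merges those independent sets with a divide-and-conquer tree of set unions, so deduplication happens in pairwise unions instead of in a threaded accumulator.
import Mathlib
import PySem

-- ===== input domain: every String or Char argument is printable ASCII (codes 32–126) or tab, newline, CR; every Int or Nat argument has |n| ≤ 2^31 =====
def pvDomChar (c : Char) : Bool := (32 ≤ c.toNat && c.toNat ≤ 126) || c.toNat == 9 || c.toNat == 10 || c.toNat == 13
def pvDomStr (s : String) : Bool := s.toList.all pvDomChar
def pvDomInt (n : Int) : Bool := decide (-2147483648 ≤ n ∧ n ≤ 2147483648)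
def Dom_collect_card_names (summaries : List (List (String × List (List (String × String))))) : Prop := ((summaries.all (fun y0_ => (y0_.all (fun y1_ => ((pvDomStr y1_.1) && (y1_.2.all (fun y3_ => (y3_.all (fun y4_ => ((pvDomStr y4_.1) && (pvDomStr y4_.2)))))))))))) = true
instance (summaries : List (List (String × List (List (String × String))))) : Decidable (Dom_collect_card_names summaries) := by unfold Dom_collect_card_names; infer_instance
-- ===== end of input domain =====

-- B replaces A's single mutable set threaded through a fused triple-nested loop by an
-- independent token set per card merged with a divide-and-conquer tree of set unions;
-- objective: alternative algorithm, similar cost.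

-- ===== PORT A =====
def collect_card_names (summaries : List (List (String × List (List (String × String))))) : List String :=
  summaries.foldl (fun names cluster =>
    (PySem.Dict.getD (PySem.Dict.mk cluster) "topCards" []).foldl (fun names card =>
      let name := PySem.Str.lower (PySem.Dict.getD (PySem.Dict.mk card) "name" "")
      let names := PySem.Set.add names name
      (PySem.Str.split₀ name).foldl (fun names word =>
        if 4 ≤ PySem.Str.len word then PySem.Set.add names word else names) names)
      names)
    PySem.Set.empty

-- ===== PORT B =====
-- the token set contributed by one card: its lowercased name and its long (>=4) words
def pvCardSet (card : List (String × String)) : PySem.Set String :=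
  let name := PySem.Str.lower (PySem.Dict.getD (PySem.Dict.mk card) "name" "")
  PySem.Set.union (PySem.Set.ofList [name])
    (PySem.Set.ofList ((PySem.Str.split₀ name).filter (fun w => 4 ≤ PySem.Str.len w)))

-- merge a list of sets with a divide-and-conquer tree of unions
-- (fuel = list length makes the halving recursion structural; it is never exhausted)
def pvUnionAllGo : Nat → List (PySem.Set String) → PySem.Set String
  | _, [] => PySem.Set.empty
  | _, [s] => s
  | 0, s :: _ => s
  | fuel + 1, s :: t :: rest =>
    let all := s :: t :: rest
    let mid := all.length / 2
    PySem.Set.union (pvUnionAllGo fuel (all.take mid)) (pvUnionAllGo fuel (all.drop mid))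

def pvUnionAll (sets : List (PySem.Set String)) : PySem.Set String :=
  pvUnionAllGo sets.length sets

def collect_card_names_alt (summaries : List (List (String × List (List (String × String))))) : List String :=
  pvUnionAll ((summaries.flatMap (fun cluster =>
    PySem.Dict.getD (PySem.Dict.mk cluster) "topCards" [])).map pvCardSet)

-- ===== PRECONDITION & SPEC =====
-- Pre_ excludes inputs where some card in a cluster's "topCards" lacks the "name" key:
-- there Python A raises KeyError (and B raises the same KeyError).
def Pre_collect_card_names (summaries : List (List (String × List (List (String × String))))) : Prop :=
  ∀ cluster ∈ summaries, ∀ card ∈ PySem.Dict.getD (PySem.Dict.mk cluster) "topCards" [],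
    (PySem.Dict.mk card).contains "name" = true
instance (summaries : List (List (String × List (List (String × String))))) : Decidable (Pre_collect_card_names summaries) := by unfold Pre_collect_card_names; infer_instance

def pvWitness_collect_card_names : (List (List (String × List (List (String × String))))) :=
  [[("topCards", [[("name", "Lightning Bolt")], [("name", "Opt")]])],
   [("other", [])]]

def Spec_collect_card_names (summaries : List (List (String × List (List (String × String))))) (out : List String) : Prop := out = collect_card_names_alt summaries
instance (summaries : List (List (String × List (List (String × String))))) (out : List String) : Decidable (Spec_collect_card_names summaries out) := by unfold Spec_collect_card_names; infer_instance

-- ===== CLAIM (what is proved, stated in full; the proofs are below) =====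
def Claim_equal_collect_card_names : Prop := ∀ (summaries : List (List (String × List (List (String × String))))), Dom_collect_card_names summaries → Pre_collect_card_names summaries → Spec_collect_card_names summaries (collect_card_names summaries)

-- ===== LEMMAS AND PROOFS =====

-- the token stream of one card, as a plain list (proof-side characterisation)
def pvCardTokens (card : List (String × String)) : List String :=
  let name := PySem.Str.lower (PySem.Dict.getD (PySem.Dict.mk card) "name" "")
  name :: (PySem.Str.split₀ name).filter (fun w => 4 ≤ PySem.Str.len w)

-- updating with a deduplicated list adds the same elements
theorem pv_update_ofList (s : PySem.Set String) (xs : List String) :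
    PySem.Set.update s (PySem.Set.ofList xs) = PySem.Set.update s xs := by
  rw [PySem.Set.update_eq_append_filter, PySem.Set.update_eq_append_filter,
    PySem.Set.ofList_ofList]

theorem pv_union_ofList (a b : List String) :
    PySem.Set.union (PySem.Set.ofList a) (PySem.Set.ofList b)
      = PySem.Set.ofList (a ++ b) := by
  show PySem.Set.update _ _ = _
  rw [pv_update_ofList, PySem.Set.ofList_append]

-- B's per-card set is the dedup of its token list
theorem pv_cardSet_eq (card : List (String × String)) :
    pvCardSet card = PySem.Set.ofList (pvCardTokens card) := by
  unfold pvCardSet pvCardTokens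
  rw [pv_union_ofList]
  rfl

-- the divide-and-conquer union of deduplicated lists is the dedup of their concatenation
theorem pv_unionAllGo_ofList : ∀ (fuel : Nat) (ts : List (List String)), ts.length ≤ fuel →
    pvUnionAllGo fuel (ts.map PySem.Set.ofList) = PySem.Set.ofList ts.flatten := by
  intro fuel
  induction fuel with
  | zero =>
    intro ts h
    have : ts = [] := List.eq_nil_of_length_eq_zero (Nat.le_zero.mp h)
    subst this; rfl
  | succ f ih =>
    intro ts h
    match ts with
    | [] => rfl
    | [t] => simp [pvUnionAllGo]
    | a :: b :: rest =>
      rw [List.map_cons, List.map_cons, pvUnionAllGo]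
      have hlen : (a :: b :: rest).length = ((a :: b :: rest).map PySem.Set.ofList).length := by
        simp
      rw [← List.map_cons, ← List.map_cons, ← List.map_take, ← List.map_drop, ← hlen]
      set l := a :: b :: rest with hl
      set mid := l.length / 2 with hmid
      have h1 : (l.take mid).length ≤ f := by
        simp only [List.length_take, hl, List.length_cons] at *
        omega
      have h2 : (l.drop mid).length ≤ f := by
        simp only [List.length_drop, hl, List.length_cons] at *
        omega
      rw [ih _ h1, ih _ h2, pv_union_ofList, ← List.flatten_append,
        List.take_append_drop]

theorem pv_unionAll_ofList (ts : List (List String)) :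
    pvUnionAll (ts.map PySem.Set.ofList) = PySem.Set.ofList ts.flatten := by
  unfold pvUnionAll
  rw [List.length_map]
  exact pv_unionAllGo_ofList ts.length ts (Nat.le_refl _)

-- A's inner word loop = folding Set.add over the filtered word list.
theorem pv_word_loop (ws : List String) (s : PySem.Set String) :
    ws.foldl (fun names word =>
        if 4 ≤ PySem.Str.len word then PySem.Set.add names word else names) s
      = (ws.filter (fun w => 4 ≤ PySem.Str.len w)).foldl PySem.Set.add s := by
  induction ws generalizing s with
  | nil => rfl
  | cons w ws ih =>
    by_cases h : 4 ≤ PySem.Str.len w <;>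
      simp only [List.foldl_cons, List.filter_cons, h, decide_true, decide_false,
        if_true, if_false] <;> exact ih _

-- A's per-card step = folding Set.add over that card's token list.
theorem pv_card_step (card : List (List (String × String))) (s : PySem.Set String) :
    card.foldl (fun names card =>
      let name := PySem.Str.lower (PySem.Dict.getD (PySem.Dict.mk card) "name" "")
      let names := PySem.Set.add names name
      (PySem.Str.split₀ name).foldl (fun names word =>
        if 4 ≤ PySem.Str.len word then PySem.Set.add names word else names) names) s
      = (card.flatMap pvCardTokens).foldl PySem.Set.add s := by
  induction card generalizing s with
  | nil => rfl
  | cons c cs ih =>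
    simp only [List.foldl_cons, List.flatMap_cons, List.foldl_append, pvCardTokens]
    rw [pv_word_loop, ih]

-- A's whole loop = folding Set.add over the full token stream.
theorem pv_main (summaries : List (List (String × List (List (String × String)))))
    (s : PySem.Set String) :
    summaries.foldl (fun names cluster =>
      (PySem.Dict.getD (PySem.Dict.mk cluster) "topCards" []).foldl (fun names card =>
        let name := PySem.Str.lower (PySem.Dict.getD (PySem.Dict.mk card) "name" "")
        let names := PySem.Set.add names name
        (PySem.Str.split₀ name).foldl (fun names word =>
          if 4 ≤ PySem.Str.len word then PySem.Set.add names word else names) names)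
        names) s
      = (summaries.flatMap (fun cluster =>
          (PySem.Dict.getD (PySem.Dict.mk cluster) "topCards" []).flatMap pvCardTokens)).foldl
          PySem.Set.add s := by
  induction summaries generalizing s with
  | nil => rfl
  | cons c cs ih =>
    simp only [List.foldl_cons, List.flatMap_cons, List.foldl_append]
    rw [pv_card_step, ih]

-- ===== VERDICT (by name: the statement is the Claim_ definition above) =====
theorem collect_card_names_spec : Claim_equal_collect_card_names := by
  intro summaries _ _
  unfold Spec_collect_card_names collect_card_names collect_card_names_alt
  have hm : ∀ (L : List (List (String × String))),
      L.map pvCardSet = List.map PySem.Set.ofList (L.map pvCardTokens) := by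
    intro L
    induction L with
    | nil => rfl
    | cons c cs ih => rw [List.map_cons, List.map_cons, List.map_cons, ih, pv_cardSet_eq]
  rw [pv_main]
  rw [hm]
  rw [pv_unionAll_ofList]
  rw [← List.flatMap_def]
  rw [List.flatMap_assoc]
  rfl
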